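-- pv_equiv track=rewrite | github.com/humancipher/Programming_Contest | Programming_Contest/AtCoder/other/digitalarts2012/digitalarts2012_B.py | solve
-- ===== SOURCE A (Python) =====
-- def hash(a):
--     return ord(a) - ord("a") + 1
--
-- def rev_hash(n):
--     return chr(n + ord("a") - 1)
--
-- def solve(pw):
--     if pw == "a" or pw == "z"*20:
--         return "NO"
--     else:
--         PWL = list(pw)
--         if len(set(PWL)) >= 2:
--             flag = False
--             for i in range(len(PWL)):
--                 for j in range(i+1,len(PWL)):
--                     if PWL[i] != PWL[j]:
--                         PWL[i],PWL[j] = PWL[j],PWL[i]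
--                         flag = True
--                         break
--                 if flag:
--                     break
--             return "".join(PWL)
--         else:
--             if len(pw) >= 2:
--                 if pw[0] == "a":
--                     PWL[-2] = "b"
--                     return "".join(PWL[:len(PWL)-1])
--                 elif pw[0] == "z":
--                     PWL[-1] = "y"
--                     return "".join(PWL) + "a"
--                 else:
--                     PWL[-2] = rev_hash(hash(PWL[-2])+1)
--                     PWL[-1] = rev_hash(hash(PWL[-1])-1)
--                     return "".join(PWL)
--             else:
--                 PWL[-1] = rev_hash(hash(PWL[-1])-1)
--                 return "".join(PWL) + "a"
-- ===== SOURCE B (Python) =====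
-- def solve(pw):
--     if pw == "a" or pw == "z" * 20:
--         return "NO"
--     c = pw[0]
--     stripped = pw.lstrip(c)
--     if stripped:
--         # pw = c*m + stripped; swapping pw[0] with the first differing char
--         # yields stripped[0] followed by m copies of c and the rest of stripped
--         m = len(pw) - len(stripped)
--         return stripped[0] + c * m + stripped[1:]
--     # pw is n copies of one character c
--     n = len(pw)
--     if c == "a":
--         return "a" * (n - 2) + "b"
--     if c == "z" or n == 1:
--         return c * (n - 1) + chr(ord(c) - 1) + "a"
--     return c * (n - 2) + chr(ord(c) + 1) + chr(ord(c) - 1)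
-- ===== Notes on version B (the rewrite author's own statement) =====
-- stated objective: simpler
-- what changed: Instead of A's nested i/j swap loops over a mutated list (plus a set() to pick the branch), B strips the leading run of pw[0] with lstrip and rebuilds the answer in closed form from the run length via string repetition; the all-equal cascade becomes repetition formulas with the z-case and the length-1 case merged into one. Pre_ only excludes the empty string, on which A raises IndexError (B raises too).
import Mathlib
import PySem

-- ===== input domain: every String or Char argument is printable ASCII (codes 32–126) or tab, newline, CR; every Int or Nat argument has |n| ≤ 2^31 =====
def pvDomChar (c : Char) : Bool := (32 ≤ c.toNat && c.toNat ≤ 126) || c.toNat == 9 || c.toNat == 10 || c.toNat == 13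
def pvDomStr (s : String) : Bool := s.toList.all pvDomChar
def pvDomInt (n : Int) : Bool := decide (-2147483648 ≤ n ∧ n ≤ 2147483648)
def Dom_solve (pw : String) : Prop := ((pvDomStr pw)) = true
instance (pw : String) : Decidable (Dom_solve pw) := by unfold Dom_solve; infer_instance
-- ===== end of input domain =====

-- B replaces A's nested swap search and list mutation by a run-length characterisation:
-- it strips the leading run of pw[0] (lstrip) and rebuilds the answer in closed form from
-- the run length with string repetition; the all-equal cascade becomes repetition formulas
-- with the z-case and the length-1 case merged (objective: simpler).

-- ===== PORT A =====
def pyHash (a : Char) : Int := (a.toNat : Int) - ('a'.toNat : Int) + 1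

def revHash (n : Int) : Char := Char.ofNat (n + ('a'.toNat : Int) - 1).toNat
-- exact for Python's chr on the arguments reached from Dom (always nonnegative there)

-- the inner `for j in range(i+1, len(PWL))` loop: first j with PWL[i] != PWL[j] (ci = PWL[i])
def aFindJ (l : List Char) (ci : Char) (j : Nat) : Option Nat :=
  if _h : j < l.length then
    if l.getD j ' ' ≠ ci then some j else aFindJ l ci (j + 1)
  else none
termination_by l.length - j

-- the outer `for i in range(len(PWL))` loop with the flag/break: swap at the first (i, j) found
def aLoop (l : List Char) (i : Nat) : List Char :=
  if _h : i < l.length then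
    match aFindJ l (l.getD i ' ') (i + 1) with
    | some j => (l.set i (l.getD j ' ')).set j (l.getD i ' ')
    | none => aLoop l (i + 1)
  else l
termination_by l.length - i

def solve (pw : String) : String :=
  if pw = "a" ∨ pw = "zzzzzzzzzzzzzzzzzzzz" then "NO"
  else
    let PWL := pw.toList
    if (PySem.Set.ofList PWL).length ≥ 2 then
      String.ofList (aLoop PWL 0)
    else
      if PWL.length ≥ 2 then
        -- negative indices -2/-1 are PWL.length-2 / PWL.length-1 here (len ≥ 2)
        if PWL.getD 0 ' ' = 'a' then
          String.ofList ((PWL.set (PWL.length - 2) 'b').take (PWL.length - 1))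
        else if PWL.getD 0 ' ' = 'z' then
          String.ofList (PWL.set (PWL.length - 1) 'y' ++ ['a'])
        else
          let P2 := PWL.set (PWL.length - 2) (revHash (pyHash (PWL.getD (PWL.length - 2) ' ') + 1))
          String.ofList (P2.set (P2.length - 1) (revHash (pyHash (P2.getD (P2.length - 1) ' ') - 1)))
      else
        String.ofList (PWL.set (PWL.length - 1) (revHash (pyHash (PWL.getD (PWL.length - 1) ' ') - 1)) ++ ['a'])

-- ===== PORT B =====
def solve_alt (pw : String) : String :=
  if pw = "a" ∨ pw = "zzzzzzzzzzzzzzzzzzzz" then "NO"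
  else
    let l := pw.toList
    let c := l.getD 0 ' '
    -- pw.lstrip(c) with a single-character argument: drop the leading run of c (exact)
    let stripped := l.dropWhile (· = c)
    if stripped ≠ [] then
      let m := l.length - stripped.length
      String.ofList (stripped.getD 0 ' ' :: (List.replicate m c ++ stripped.drop 1))
    else
      let n := l.length
      if c = 'a' then
        String.ofList (List.replicate (n - 2) 'a' ++ ['b'])
      else if c = 'z' ∨ n = 1 then
        String.ofList (List.replicate (n - 1) c ++ [Char.ofNat ((c.toNat : Int) - 1).toNat, 'a'])
      else
        String.ofList (List.replicate (n - 2) c ++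
          [Char.ofNat ((c.toNat : Int) + 1).toNat, Char.ofNat ((c.toNat : Int) - 1).toNat])

-- ===== PRECONDITION & SPEC =====
-- Pre_ excludes only the empty string, on which A (and B) raise IndexError.
def Pre_solve (pw : String) : Prop := pw ≠ ""
instance (pw : String) : Decidable (Pre_solve pw) := by unfold Pre_solve; infer_instance
def pvWitness_solve : String := "ab"

def Spec_solve (pw : String) (out : String) : Prop := out = solve_alt pw
instance (pw : String) (out : String) : Decidable (Spec_solve pw out) := by unfold Spec_solve; infer_instance

-- ===== CLAIM (what is proved, stated in full; the proofs are below) =====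
def Claim_equal_solve : Prop := ∀ (pw : String), Dom_solve pw → Pre_solve pw → Spec_solve pw (solve pw)

-- ===== LEMMAS AND PROOFS =====

theorem aFindJ_eq (l : List Char) (ci : Char) : ∀ j : Nat,
    aFindJ l ci j = ((l.drop j).findIdx? (fun x => x ≠ ci)).map (fun k => j + k) := by
  intro j
  fun_induction aFindJ l ci j with
  | case1 j h hne =>
    rw [List.drop_eq_getElem_cons h, List.findIdx?_cons]
    rw [List.getD_eq_getElem l ' ' h] at hne
    simp [hne]
  | case2 j h heq ih =>
    rw [List.drop_eq_getElem_cons h, List.findIdx?_cons]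
    rw [List.getD_eq_getElem l ' ' h] at heq
    simp only [ne_eq, Decidable.not_not] at heq
    simp only [heq, decide_not, decide_true, Bool.not_true, Bool.false_eq_true, if_false]
    rw [ih, Option.map_map]
    simp only [decide_not]
    cases hf : (l.drop (j + 1)).findIdx? (fun x => !decide (x = ci)) with
    | none => rfl
    | some k => simp [Function.comp]; omega
  | case3 j h =>
    have hd : l.drop j = [] := List.drop_eq_nil_of_le (by omega)
    simp [hd]

-- the first index found by findIdx? splits the list: a leading run of c, then the rest
theorem findIdx_run (c : Char) : ∀ (rest : List Char) (k : Nat),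
    rest.findIdx? (fun x => x ≠ c) = some k →
    rest.dropWhile (· = c) = rest.drop k ∧ rest.take k = List.replicate k c := by
  intro rest
  induction rest with
  | nil => intro k h; simp [List.findIdx?_nil] at h
  | cons a t ih =>
    intro k h
    rw [List.findIdx?_cons] at h
    by_cases ha : a = c
    · simp only [ha, ne_eq, not_true_eq_false, decide_false, Bool.false_eq_true, if_false] at h
      cases hk : t.findIdx? (fun x => x ≠ c) with
      | none => rw [show (fun x => decide ¬ x = c) = (fun x => !decide (x = c)) by
                      funext x; simp] at hk
                simp [decide_not, hk] at h
      | some k' =>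
        have hkk : k = k' + 1 := by
          rw [show (fun x => decide ¬ x = c) = (fun x => !decide (x = c)) by
                funext x; simp] at hk
          simp [decide_not, hk] at h; omega
        obtain ⟨h1, h2⟩ := ih k' hk
        subst hkk
        refine ⟨?_, ?_⟩
        · simpa [List.dropWhile, ha] using h1
        · simp [ha, List.take, h2, List.replicate_succ]
    · simp only [ne_eq, ha, not_false_eq_true, decide_true, if_true] at h
      have : k = 0 := by simpa using h.symm
      subst this
      exact ⟨by simp [List.dropWhile, ha], by simp⟩

theorem set_take_succ (b : Char) : ∀ (l : List Char) (i : Nat), i < l.length →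
    (l.set i b).take (i + 1) = l.take i ++ [b] := by
  intro l
  induction l with
  | nil => intro i h; simp at h
  | cons a t ih =>
    intro i h
    cases i with
    | zero => simp
    | succ i => simp [List.set, List.take, ih i (by simpa using h)]

theorem set_last (b : Char) : ∀ (l : List Char) (i : Nat), i + 1 = l.length →
    l.set i b = l.take i ++ [b] := by
  intro l
  induction l with
  | nil => intro i h; simp at h
  | cons a t ih =>
    intro i h
    cases i with
    | zero =>
      have : t = [] := by cases t <;> simp_all
      simp [this]
    | succ i => simp [List.set, List.take, ih i (by simpa using h)]

theorem ofList_all_eq (c : Char) (rest : List Char) (hall : ∀ x ∈ rest, x = c) :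
    PySem.Set.ofList (c :: rest) = [c] := by
  rw [PySem.Set.ofList_eq_foldl]
  have step : ∀ t : List Char, (∀ x ∈ t, x = c) → List.foldl PySem.Set.add [c] t = [c] := by
    intro t
    induction t with
    | nil => intro _; rfl
    | cons a t ih =>
      intro h
      have ha : a = c := h a (by simp)
      have : PySem.Set.add [c] a = [c] := by simp [PySem.Set.add, ha]
      simp only [List.foldl_cons, this]
      exact ih (fun x hx => h x (by simp [hx]))
  simpa [PySem.Set.add, PySem.Set.empty] using step rest hall

theorem two_mem_length {s : List Char} {a b : Char} (ha : a ∈ s) (hb : b ∈ s) (hab : a ≠ b) :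
    2 ≤ s.length := by
  match s with
  | [] => simp at ha
  | [x] => simp at ha hb; exact absurd (ha.trans hb.symm) hab
  | x :: y :: t => simp

theorem cond_iff (c : Char) (rest : List Char) :
    2 ≤ (PySem.Set.ofList (c :: rest)).length ↔ ¬(∀ x ∈ rest, x = c) := by
  constructor
  · intro h hall
    rw [ofList_all_eq c rest hall] at h
    simp at h
  · intro hall
    rw [not_forall] at hall
    simp only [not_forall, exists_prop] at hall
    obtain ⟨x, hx, hxc⟩ := hall
    have hc : c ∈ PySem.Set.ofList (c :: rest) := by
      rw [PySem.Set.mem_ofList]; simp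
    have hx' : x ∈ PySem.Set.ofList (c :: rest) := by
      rw [PySem.Set.mem_ofList]; simp [hx]
    exact two_mem_length hc hx' (Ne.symm hxc)

theorem getD_all_eq {l : List Char} {c : Char} (hall : ∀ x ∈ l, x = c) {i : Nat}
    (h : i < l.length) : l.getD i ' ' = c := by
  rw [List.getD_eq_getElem l ' ' h]
  exact hall _ (List.getElem_mem h)

theorem take_all_eq {l : List Char} {c : Char} (hall : ∀ x ∈ l, x = c) {j : Nat}
    (h : j ≤ l.length) : l.take j = List.replicate j c := by
  have hl : l = List.replicate l.length c := List.eq_replicate_iff.mpr ⟨rfl, hall⟩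
  rw [hl, List.take_replicate, Nat.min_eq_left (by simpa using h)]

-- ===== VERDICT (by name: the statement is the Claim_ definition above) =====
theorem solve_spec : Claim_equal_solve := by
  intro pw _hdom hpre
  unfold Spec_solve solve solve_alt
  by_cases hg : pw = "a" ∨ pw = "zzzzzzzzzzzzzzzzzzzz"
  · simp [hg]
  · simp only [if_neg hg]
    have hnil : pw.toList ≠ [] := by
      rw [ne_eq, String.toList_eq_nil_iff]; exact hpre
    obtain ⟨c, rest, hcr⟩ : ∃ c rest, pw.toList = c :: rest := by
      cases h : pw.toList with
      | nil => exact absurd h hnil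
      | cons a t => exact ⟨a, t, rfl⟩
    rw [hcr]
    simp only [List.getD_cons_zero]
    have hdw : (c :: rest).dropWhile (· = c) = rest.dropWhile (· = c) := by
      simp [List.dropWhile]
    rw [hdw]
    by_cases hall : ∀ x ∈ rest, x = c
    · -- all characters equal: A takes the cascade, B's stripped is empty
      have hset : ¬ (2 ≤ (PySem.Set.ofList (c :: rest)).length) := by
        rw [cond_iff]; simpa using hall
      have hstr : rest.dropWhile (· = c) = [] := by
        rw [List.dropWhile_eq_nil_iff]; intro x hx; simp [hall x hx]
      rw [if_neg (by simpa using hset)]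
      rw [hstr]
      rw [if_neg (show ¬(([] : List Char) ≠ []) from fun h => h rfl)]
      cases rest with
      | nil =>
        -- length 1; c ≠ 'a' since pw = "a" is behind the guard
        have hca : c ≠ 'a' := by
          intro h
          exact hg (Or.inl (String.toList_inj.mp (by rw [hcr, h]; rfl)))
        rw [if_neg hca, if_pos (by simp : c = 'z' ∨ ([c] : List Char).length = 1)]
        simp only [List.length_cons, List.length_nil]
        norm_num
        simp only [revHash, pyHash]
        rw [if_neg hca]
        congr 3
        omega
      | cons r rs =>
        have hr : r = c := hall r (by simp)
        have hlen2 : 2 ≤ (c :: r :: rs).length := by simp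
        rw [if_pos hlen2]
        set l : List Char := c :: r :: rs with hl
        have hlenl : l.length = rs.length + 2 := by simp [hl]
        have halll : ∀ x ∈ l, x = c := by
          intro x hx
          rcases (by simpa [hl] using hx : x = c ∨ x = r ∨ x ∈ rs) with h | h | h
          · exact h
          · rw [h, hr]
          · exact hall x (by simp [h])
        by_cases hca : c = 'a'
        · rw [if_pos hca, if_pos hca]
          congr 1
          have h1 : l.length - 2 < l.length := by omega
          have h2 : (l.length - 2) + 1 = l.length - 1 := by omega
          rw [← h2, set_take_succ 'b' l (l.length - 2) h1,
              take_all_eq halll (by omega), hca]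
        · rw [if_neg hca, if_neg hca]
          by_cases hcz : c = 'z'
          · rw [if_pos hcz, if_pos (Or.inl hcz)]
            congr 1
            rw [set_last 'y' l (l.length - 1) (by omega),
                take_all_eq halll (by omega), hcz]
            simp
          · rw [if_neg hcz, if_neg (by simp [hcz]; omega)]
            congr 1
            have hg2 : l.getD (l.length - 2) ' ' = c := getD_all_eq halll (by omega)
            have hlen' : (l.set (l.length - 2) (revHash (pyHash c + 1))).length = l.length :=
              by simp
            have hg1 : (l.set (l.length - 2) (revHash (pyHash c + 1))).getD (l.length - 1) ' ' = c := by
              rw [List.getD_eq_getElem _ ' ' (by rw [hlen']; omega)]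
              rw [List.getElem_set_ne (by omega)]
              exact halll _ (List.getElem_mem (by omega))
            rw [hg2, hlen', hg1]
            rw [set_last _ (l.set (l.length - 2) (revHash (pyHash c + 1))) (l.length - 1)
                (by rw [hlen']; omega)]
            have htake : (l.set (l.length - 2) (revHash (pyHash c + 1))).take (l.length - 1) =
                l.take (l.length - 2) ++ [revHash (pyHash c + 1)] := by
              have h2 : (l.length - 2) + 1 = l.length - 1 := by omega
              rw [← h2, set_take_succ _ l (l.length - 2) (by omega)]
            rw [htake, List.append_assoc, take_all_eq halll (by omega)]
            congr 1
            have e1 : revHash (pyHash c + 1) = Char.ofNat ((c.toNat : Int) + 1).toNat := by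
              simp only [revHash, pyHash]; congr 1; omega
            have e2 : revHash (pyHash c - 1) = Char.ofNat ((c.toNat : Int) - 1).toNat := by
              simp only [revHash, pyHash]; congr 1; omega
            rw [e1, e2]
            rfl
    · -- some character differs: A's double loop hits (i, j) = (0, k+1); B strips the run of c
      have hset : 2 ≤ (PySem.Set.ofList (c :: rest)).length := (cond_iff c rest).mpr hall
      obtain ⟨k, hk⟩ : ∃ k, rest.findIdx? (fun x => x ≠ c) = some k := by
        cases h : rest.findIdx? (fun x => x ≠ c) with
        | none =>
          exfalso; apply hall
          intro x hx
          have := (List.findIdx?_eq_none_iff.mp h) x hx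
          simpa using this
        | some k => exact ⟨k, rfl⟩
      have hklt : k < rest.length := by
        obtain ⟨h, _, _⟩ := List.findIdx?_eq_some_iff_getElem.mp hk
        exact h
      obtain ⟨hdrop, htak⟩ := findIdx_run c rest k hk
      have hrk : rest.drop k = rest.getD k ' ' :: rest.drop (k + 1) := by
        rw [List.drop_eq_getElem_cons hklt, List.getD_eq_getElem rest ' ' hklt]
      rw [if_pos (by simpa using hset), hdrop, hrk,
          if_pos (by simp)]
      -- B's run length m is k + 1
      have hm : (c :: rest).length - (rest.getD k ' ' :: rest.drop (k + 1)).length = k + 1 := by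
        simp; omega
      rw [hm]
      -- A's loop: i = 0, j = k + 1
      have hfj : aFindJ (c :: rest) c 1 = some (k + 1) := by
        rw [aFindJ_eq]
        simp only [List.drop_one, List.tail_cons, hk, Option.map_some]
        congr 1
        omega
      rw [aLoop, dif_pos (by simp)]
      simp only [List.getD_cons_zero, hfj]
      have hgd : (c :: rest).getD (k + 1) ' ' = rest.getD k ' ' := by
        simp [List.getD]
      rw [hgd]
      simp only [List.set_cons_zero, List.set_cons_succ]
      congr 2
      rw [List.set_eq_take_append_cons_drop, if_pos hklt, htak,
          List.replicate_succ', List.append_assoc]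
      simp
-- ===== end =====
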